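-- pv_equiv track=rewrite | github.com/DiePiPi/nanaimo_housing | visolutions/utils.py | shorten_label
-- ===== SOURCE A (Python) =====
-- def shorten_label(some_text):
--     if len(some_text)<24:
--         clean_label=some_text
--     else:
--         word_list = some_text.split()
--         phrase = [word_list[0]]
--         index = 1
--         while index < len(word_list):
--             if len(" ".join(x for x in phrase) + ' ' + word_list[index]) < 24:
--                 phrase.append(word_list[index])
--                 index = index + 1
--             else:
--                 break
--         clean_label = " ".join(x for x in phrase)
--     return clean_label
-- ===== SOURCE B (Python) =====
-- def shorten_label(some_text):
--     if len(some_text) < 24: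
--         return some_text
--     words = some_text.split()
--     # cumulative joined lengths: lengths[j] = len(" ".join(words[:j+1]))
--     total = len(words[0])
--     lengths = [total]
--     for w in words[1:]:
--         total += 1 + len(w)
--         lengths.append(total)
--     k = 1
--     while k < len(lengths) and lengths[k] < 24:
--         k += 1
--     return " ".join(words[:k])
-- ===== Notes on version B (the rewrite author's own statement) =====
-- stated objective: alternative
-- what changed: Replaces A's grow-a-phrase loop that re-joins the accumulated words to re-measure their length at every step with a precomputed table of cumulative joined lengths scanned once for the largest prefix under 24 chars, joining that prefix once at the end.
import Mathlib
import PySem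

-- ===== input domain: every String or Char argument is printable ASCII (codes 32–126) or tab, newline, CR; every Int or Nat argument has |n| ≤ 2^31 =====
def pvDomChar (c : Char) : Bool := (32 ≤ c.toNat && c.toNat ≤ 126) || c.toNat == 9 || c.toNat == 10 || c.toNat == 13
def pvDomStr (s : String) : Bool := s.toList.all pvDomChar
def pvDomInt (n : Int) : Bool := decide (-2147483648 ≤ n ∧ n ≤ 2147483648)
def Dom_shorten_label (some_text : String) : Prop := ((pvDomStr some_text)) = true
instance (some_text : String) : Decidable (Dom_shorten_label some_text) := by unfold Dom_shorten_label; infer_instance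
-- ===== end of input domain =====

-- B replaces A's grow-and-rejoin loop with a precomputed table of cumulative joined
-- lengths scanned once for the largest prefix under 24 chars (objective: alternative).

-- ===== PORT A =====
-- the 'while index < len(word_list)' loop of A: state (phrase, index)
def pvALoop (word_list : List String) (phrase : List String) (index : Nat) : List String :=
  if h : index < word_list.length then
    if PySem.Str.len (PySem.Str.join " " phrase ++ " " ++ word_list[index]) < 24 then
      pvALoop word_list (phrase ++ [word_list[index]]) (index + 1)
    else phrase
  else phrase
termination_by word_list.length - index

def shorten_label (some_text : String) : String :=
  if PySem.Str.len some_text < 24 then some_text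
  else
    let word_list := PySem.Str.split₀ some_text
    match word_list with
    | [] => ""   -- word_list[0] raises IndexError in Python here; excluded by Pre_
    | w0 :: _ => PySem.Str.join " " (pvALoop word_list [w0] 1)

-- ===== PORT B =====
-- the cumulative-length table: lengths[j] = len(" ".join(words[:j+1]))
def pvLengths (total : Int) (rest : List String) : List Int :=
  match rest with
  | [] => [total]
  | w :: ws => total :: pvLengths (total + 1 + PySem.Str.len w) ws

-- the 'while k < len(lengths) and lengths[k] < 24' scan
def pvFindK (lengths : List Int) (k : Nat) : Nat :=
  if h : k < lengths.length then
    if lengths[k] < 24 then pvFindK lengths (k + 1) else k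
  else k
termination_by lengths.length - k

def shorten_label_alt (some_text : String) : String :=
  if PySem.Str.len some_text < 24 then some_text
  else
    let words := PySem.Str.split₀ some_text
    match words with
    | [] => ""   -- words[0] raises IndexError in Python here; excluded by Pre_
    | w0 :: rest =>
      let lengths := pvLengths (PySem.Str.len w0) rest
      let k := pvFindK lengths 1
      PySem.Str.join " " ((w0 :: rest).take k)

-- ===== PRECONDITION & SPEC =====
-- Pre_ excludes exactly the inputs where A raises IndexError: length ≥ 24 and the
-- whitespace split is empty (my B raises there too).
def Pre_shorten_label (some_text : String) : Prop :=
  PySem.Str.len some_text < 24 ∨ PySem.Str.split₀ some_text ≠ []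
instance (some_text : String) : Decidable (Pre_shorten_label some_text) := by
  unfold Pre_shorten_label; infer_instance

def pvWitness_shorten_label : String := "a label that is quite long indeed"

def Spec_shorten_label (some_text : String) (out : String) : Prop := out = shorten_label_alt some_text
instance (some_text : String) (out : String) : Decidable (Spec_shorten_label some_text out) := by unfold Spec_shorten_label; infer_instance

-- ===== CLAIM (what is proved, stated in full; the proofs are below) =====
def Claim_equal_shorten_label : Prop := ∀ (some_text : String), Dom_shorten_label some_text → Pre_shorten_label some_text → Spec_shorten_label some_text (shorten_label some_text)

-- ===== LEMMAS AND PROOFS =====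

theorem pvLengths_length (total : Int) (rest : List String) :
    (pvLengths total rest).length = rest.length + 1 := by
  induction rest generalizing total with
  | nil => simp [pvLengths]
  | cons w ws ih => simp [pvLengths, ih]

theorem pvLengths_get (rest : List String) (total : Int) (k : Nat) (h : k < rest.length + 1) :
    (pvLengths total rest)[k]'(by rw [pvLengths_length]; omega) =
      total + ((rest.take k).map (fun w => 1 + PySem.Str.len w)).sum := by
  induction rest generalizing total k with
  | nil =>
    simp only [List.length_nil] at h
    have : k = 0 := by omega
    subst this; simp [pvLengths]
  | cons w ws ih =>
    cases k with
    | zero => simp [pvLengths]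
    | succ k =>
      simp only [pvLengths, List.getElem_cons_succ, List.take_succ_cons, List.map_cons,
        List.sum_cons]
      rw [ih _ _ (by simpa using h)]
      omega

theorem len_join_append (p : List String) (hp : p ≠ []) (w : String) :
    PySem.Str.len (PySem.Str.join " " (p ++ [w])) =
      PySem.Str.len (PySem.Str.join " " p) + 1 + PySem.Str.len w := by
  induction p with
  | nil => exact absurd rfl hp
  | cons a t ih =>
    cases t with
    | nil =>
      simp [PySem.Str.len_eq, PySem.Str.toList_join, PySem.Chars.join_cons_cons,
        PySem.Chars.join_singleton]
      omega
    | cons b t' =>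
      have := ih (by simp)
      simp only [List.cons_append, PySem.Str.len_eq, PySem.Str.toList_join, List.map_cons,
        PySem.Chars.join_cons_cons] at *
      simp_all
      omega

theorem len_join_take (w0 : String) (rest : List String) (k : Nat) (hk : k ≤ rest.length) :
    PySem.Str.len (PySem.Str.join " " ((w0 :: rest).take (k + 1))) =
      PySem.Str.len w0 + ((rest.take k).map (fun w => 1 + PySem.Str.len w)).sum := by
  induction k with
  | zero =>
    simp [PySem.Str.len_eq, PySem.Str.toList_join, PySem.Chars.join_singleton]
  | succ k ih =>
    have hk' : k < rest.length := by omega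
    have htake : (w0 :: rest).take (k + 1 + 1) = (w0 :: rest).take (k + 1) ++ [rest[k]] := by
      simp only [List.take_succ_cons]
      rw [List.take_add_one]
      simp [List.getElem?_eq_getElem hk']
    have hmap : (rest.take (k + 1)).map (fun w => 1 + PySem.Str.len w)
        = (rest.take k).map (fun w => 1 + PySem.Str.len w) ++ [1 + PySem.Str.len rest[k]] := by
      rw [List.map_take, List.take_add_one, List.getElem?_map, List.getElem?_eq_getElem hk']
      simp
    rw [htake, len_join_append _ (by simp [List.take_succ_cons]) _, ih (by omega), hmap]
    simp [List.sum_append]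
    omega

theorem len_join_concat (p : List String) (w : String) :
    PySem.Str.len (PySem.Str.join " " p ++ " " ++ w) =
      PySem.Str.len (PySem.Str.join " " p) + 1 + PySem.Str.len w := by
  simp [PySem.Str.len_eq]
  omega

theorem loop_eq (w0 : String) (rest : List String) (i : Nat) (h1 : 1 ≤ i)
    (h2 : i ≤ rest.length + 1) :
    pvALoop (w0 :: rest) ((w0 :: rest).take i) i =
      (w0 :: rest).take (pvFindK (pvLengths (PySem.Str.len w0) rest) i) := by
  have hlen : (pvLengths (PySem.Str.len w0) rest).length = rest.length + 1 :=
    pvLengths_length _ _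
  by_cases hi : i < rest.length + 1
  · -- both guards are live and test the same condition
    have hi' : i < (w0 :: rest).length := by simpa using hi
    have hil : i < (pvLengths (PySem.Str.len w0) rest).length := by omega
    have hcond :
        (PySem.Str.len (PySem.Str.join " " ((w0 :: rest).take i) ++ " " ++ (w0 :: rest)[i]) < 24)
          ↔ ((pvLengths (PySem.Str.len w0) rest)[i]'(hil) < 24) := by
      rw [len_join_concat, pvLengths_get rest _ i hi]
      obtain ⟨j, rfl⟩ : ∃ j, i = j + 1 := ⟨i - 1, by omega⟩
      have hj : j < rest.length := by omega
      rw [show ((w0 :: rest)[j + 1]'hi') = rest[j] from by simp]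
      rw [len_join_take w0 rest j (by omega)]
      have hmap2 : (rest.take (j + 1)).map (fun w => 1 + PySem.Str.len w)
          = (rest.take j).map (fun w => 1 + PySem.Str.len w) ++ [1 + PySem.Str.len rest[j]] := by
        rw [List.map_take, List.take_add_one, List.getElem?_map, List.getElem?_eq_getElem hj]
        simp
      rw [hmap2, List.sum_append]
      simp only [List.sum_cons, List.sum_nil]
      omega
    rw [pvALoop, pvFindK]
    rw [dif_pos hi', dif_pos hil]
    by_cases hc : (pvLengths (PySem.Str.len w0) rest)[i]'hil < 24
    · rw [if_pos (hcond.mpr hc), if_pos hc]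
      have : (w0 :: rest).take i ++ [(w0 :: rest)[i]] = (w0 :: rest).take (i + 1) := by
        rw [List.take_add_one, List.getElem?_eq_getElem hi']
        simp
      rw [this]
      exact loop_eq w0 rest (i + 1) (by omega) (by omega)
    · rw [if_neg (fun hh => hc (hcond.mp hh)), if_neg hc]
  · -- i = rest.length + 1: both sides stop
    have hi' : ¬ i < (w0 :: rest).length := by simp; omega
    have hil : ¬ i < (pvLengths (PySem.Str.len w0) rest).length := by omega
    rw [pvALoop, pvFindK, dif_neg hi', dif_neg hil]
termination_by rest.length + 1 - i

-- ===== VERDICT (by name: the statement is the Claim_ definition above) =====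
theorem shorten_label_spec : Claim_equal_shorten_label := by
  intro some_text _ hpre
  unfold Spec_shorten_label shorten_label shorten_label_alt
  by_cases hshort : PySem.Str.len some_text < 24
  · rw [if_pos hshort, if_pos hshort]
  · rw [if_neg hshort, if_neg hshort]
    cases hsplit : PySem.Str.split₀ some_text with
    | nil =>
      rcases hpre with h | h
      · exact absurd h hshort
      · exact absurd hsplit h
    | cons w0 rest =>
      show PySem.Str.join " " (pvALoop (w0 :: rest) [w0] 1) =
        PySem.Str.join " " ((w0 :: rest).take (pvFindK (pvLengths (PySem.Str.len w0) rest) 1))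
      have h1 : ([w0] : List String) = (w0 :: rest).take 1 := by simp
      rw [h1, loop_eq w0 rest 1 le_rfl (by omega)]
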